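-- pv_equiv track=rewrite | github.com/Connor-Sandall/cisco-stig-compliance | filter_plugins/stig_filters.py | get_compliance_status
-- ===== SOURCE A (Python) =====
-- def get_compliance_status(check_results):
--     """
--     Determine overall compliance status from multiple check results.
--
--     Args:
--         check_results: List of check result dicts with 'compliant' key
--
--     Returns:
--         'compliant', 'non_compliant', or 'partial'
--     """
--     if not check_results:
--         return 'unknown'
--
--     compliant_count = sum(1 for r in check_results if r.get('compliant', False))
--     total = len(check_results)
--
--     if compliant_count == total:
--         return 'compliant'
--     elif compliant_count == 0:
--         return 'non_compliant'
--     else: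
--         return 'partial'
-- ===== SOURCE B (Python) =====
-- def get_compliance_status(check_results):
--     """Determine overall compliance status from multiple check results."""
--     seen = frozenset(bool(r.get('compliant', False)) for r in check_results)
--     table = {frozenset(): 'unknown',
--              frozenset({True}): 'compliant',
--              frozenset({False}): 'non_compliant',
--              frozenset({True, False}): 'partial'}
--     return table[seen]
-- ===== Notes on version B (the rewrite author's own statement) =====
-- stated objective: alternative
-- what changed: Instead of counting compliant entries and comparing against the total, B collects the SET of distinct compliance flags seen and maps that set through a fixed 4-entry table (empty->unknown, {True}->compliant, {False}->non_compliant, {True,False}->partial); no counter, no total, no branch chain over counts.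
import Mathlib
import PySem

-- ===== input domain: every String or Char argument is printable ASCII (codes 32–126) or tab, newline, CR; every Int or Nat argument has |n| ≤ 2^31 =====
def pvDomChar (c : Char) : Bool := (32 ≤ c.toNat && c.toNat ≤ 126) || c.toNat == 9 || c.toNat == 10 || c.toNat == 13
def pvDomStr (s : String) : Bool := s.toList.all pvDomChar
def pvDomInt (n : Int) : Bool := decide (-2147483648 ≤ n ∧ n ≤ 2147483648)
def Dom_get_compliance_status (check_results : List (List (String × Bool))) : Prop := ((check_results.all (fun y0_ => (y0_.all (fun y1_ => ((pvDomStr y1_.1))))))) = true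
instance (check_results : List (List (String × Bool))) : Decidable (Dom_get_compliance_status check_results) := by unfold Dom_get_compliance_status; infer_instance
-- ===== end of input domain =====

-- B replaces A's count/total comparison with the set of distinct compliance flags seen, mapped through a fixed 4-entry table (alternative decomposition, same cost).

-- ===== PORT A =====
-- r.get('compliant', False) on the association list r
def pvGetCompliant (r : List (String × Bool)) : Bool :=
  (PySem.Dict.mk r).getD "compliant" false

def get_compliance_status (check_results : List (List (String × Bool))) : String :=
  if check_results = [] then "unknown"
  else
    -- sum(1 for r in check_results if r.get('compliant', False))
    let compliant_count : Int := (check_results.filter (fun r => pvGetCompliant r)).length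
    let total : Int := check_results.length
    if compliant_count = total then "compliant"
    else if compliant_count = 0 then "non_compliant"
    else "partial"

-- ===== PORT B =====
-- seen = frozenset(bool(r.get('compliant', False)) for r in check_results); then a table
-- lookup keyed by which of the two flags the set contains (frozenset equality over Bool
-- is exactly membership of true and of false).
def get_compliance_status_alt (check_results : List (List (String × Bool))) : String :=
  let seen : PySem.Set Bool :=
    PySem.Set.ofList (check_results.map (fun r => pvGetCompliant r))
  match seen.contains true, seen.contains false with
  | false, false => "unknown"
  | true,  false => "compliant"
  | false, true  => "non_compliant"
  | true,  true  => "partial"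

-- ===== PRECONDITION & SPEC =====
def Spec_get_compliance_status (check_results : List (List (String × Bool))) (out : String) : Prop := out = get_compliance_status_alt check_results
instance (check_results : List (List (String × Bool))) (out : String) : Decidable (Spec_get_compliance_status check_results out) := by unfold Spec_get_compliance_status; infer_instance

-- ===== CLAIM =====
def Claim_equal_get_compliance_status : Prop := ∀ (check_results : List (List (String × Bool))), Dom_get_compliance_status check_results → Spec_get_compliance_status check_results (get_compliance_status check_results)

-- ===== LEMMAS AND PROOFS =====
theorem pv_count_eq_len_iff (xs : List (List (String × Bool))) :
    (((xs.filter (fun r => pvGetCompliant r)).length : Int) = (xs.length : Int)) ↔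
      xs.all (fun r => pvGetCompliant r) = true := by
  rw [Int.ofNat_inj, List.length_filter_eq_length_iff, List.all_eq_true]

theorem pv_count_eq_zero_iff (xs : List (List (String × Bool))) :
    (((xs.filter (fun r => pvGetCompliant r)).length : Int) = 0) ↔
      xs.any (fun r => pvGetCompliant r) = false := by
  simp [List.filter_eq_nil_iff, List.any_eq_false]

theorem pv_seen_true (xs : List (List (String × Bool))) :
    (PySem.Set.ofList (xs.map (fun r => pvGetCompliant r))).contains true =
      xs.any (fun r => pvGetCompliant r) := by
  cases h : xs.any (fun r => pvGetCompliant r) <;>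
    simp_all [PySem.Set.mem_ofList, List.any_eq_false, List.any_eq_true]

theorem pv_seen_false (xs : List (List (String × Bool))) :
    (PySem.Set.ofList (xs.map (fun r => pvGetCompliant r))).contains false =
      !xs.all (fun r => pvGetCompliant r) := by
  cases h : xs.all (fun r => pvGetCompliant r) <;>
    simp_all [PySem.Set.mem_ofList, List.all_eq_true, List.all_eq_false]

-- ===== VERDICT =====
theorem get_compliance_status_spec : Claim_equal_get_compliance_status := by
  intro xs _
  unfold Spec_get_compliance_status get_compliance_status get_compliance_status_alt
  dsimp only
  rw [pv_seen_true, pv_seen_false]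
  by_cases hnil : xs = []
  · simp [hnil]
  · simp only [hnil, if_false]
    by_cases hall : xs.all (fun r => pvGetCompliant r) = true
    · have hany : xs.any (fun r => pvGetCompliant r) = true := by
        obtain ⟨r, hr⟩ := List.exists_mem_of_ne_nil xs hnil
        exact List.any_eq_true.2 ⟨r, hr, by simpa using (List.all_eq_true.1 hall) r hr⟩
      rw [if_pos ((pv_count_eq_len_iff xs).2 hall), hall, hany]; rfl
    · rw [if_neg (fun h => hall ((pv_count_eq_len_iff xs).1 h))]
      have hallb : xs.all (fun r => pvGetCompliant r) = false := by
        cases h : xs.all (fun r => pvGetCompliant r) <;> simp_all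
      rw [hallb]
      by_cases hany : xs.any (fun r => pvGetCompliant r) = true
      · rw [if_neg (fun h => by simp [(pv_count_eq_zero_iff xs).1 h] at hany), hany]; rfl
      · have : xs.any (fun r => pvGetCompliant r) = false := by
          cases h : xs.any (fun r => pvGetCompliant r) <;> simp_all
        rw [if_pos ((pv_count_eq_zero_iff xs).2 this), this]; rfl
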